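-- pv_equiv track=rewrite | github.com/ladokp/aoc2022 | solution/aoc_day_22.py | parse_intructions
-- ===== SOURCE A (Python) =====
-- def parse_intructions(instructions):
--     li = []
--     while len(instructions) != 0:
--         i = 1
--         while instructions[:i].isnumeric() and i <= len(instructions):
--             i += 1
--         li.append((instructions[: i - 1], instructions[i - 1 : i]))
--         instructions = instructions[i:]
--     return [x for x in li if x != ""]
-- ===== SOURCE B (Python) =====
-- def parse_intructions(instructions):
--     result = []
--     num = ""
--     for character in instructions:
--         if character.isnumeric():
--             num += character
--         else:
--             result.append((num, character))
--             num = ""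
--     if num:
--         result.append((num, ""))
--     return result
-- ===== Notes on version B (the rewrite author's own statement) =====
-- stated objective: simpler
-- what changed: A repeatedly re-tests growing prefixes with str.isnumeric and re-slices the remaining string each round (quadratic re-scanning); B is a single left-to-right scan keeping a digit buffer, emitting (buffer, char) at each non-digit and a trailing (buffer, "") at the end, with no slicing and no final filter.
import Mathlib
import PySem

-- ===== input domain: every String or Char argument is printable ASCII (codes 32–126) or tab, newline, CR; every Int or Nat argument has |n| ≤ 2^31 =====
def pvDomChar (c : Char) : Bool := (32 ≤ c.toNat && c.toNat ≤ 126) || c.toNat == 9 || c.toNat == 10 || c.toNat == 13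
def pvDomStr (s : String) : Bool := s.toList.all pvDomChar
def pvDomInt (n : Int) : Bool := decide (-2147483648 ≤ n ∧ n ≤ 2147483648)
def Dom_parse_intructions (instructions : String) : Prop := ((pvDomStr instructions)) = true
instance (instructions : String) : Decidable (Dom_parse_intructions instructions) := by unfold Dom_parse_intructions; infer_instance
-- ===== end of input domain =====

-- B replaces A's quadratic prefix-retesting/re-slicing loop by one linear scan with a digit buffer (objective: simpler).

-- ===== PORT A =====
-- instructions[:i].isnumeric(); on the ASCII input domain isnumeric coincides with isdigit (characters '0'–'9')
def pvIsnumeric (l : List Char) : Bool := PySem.Chars.strIsdigit l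

-- inner while: i = 1; while instructions[:i].isnumeric() and i <= len(instructions): i += 1
-- (fuel only makes the recursion structural; len(s)+1-i iterations always suffice, see pvFindAGo_eq below)
def pvFindAGo (fuel : Nat) (s : List Char) (i : Nat) : Nat :=
  match fuel with
  | 0 => i
  | fuel + 1 =>
    if pvIsnumeric (s.take i) && i ≤ s.length then pvFindAGo fuel s (i + 1) else i

def pvFindA (s : List Char) (i : Nat) : Nat := pvFindAGo (s.length + 1 - i) s i

-- outer while over the shrinking string (fuel = length: every round drops at least one character)
def pvLoopAGo (fuel : Nat) (s : List Char) : List (List Char × List Char) :=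
  match fuel with
  | 0 => []
  | fuel + 1 =>
    if s.length = 0 then []
    else
      let i := pvFindA s 1
      (PySem.List.slice s none (some ((i : Int) - 1)),
       PySem.List.slice s (some ((i : Int) - 1)) (some (i : Int))) ::
        pvLoopAGo fuel (PySem.List.slice s (some (i : Int)) none)

def pvLoopA (s : List Char) : List (List Char × List Char) := pvLoopAGo s.length s

def parse_intructions (instructions : String) : List (String × String) :=
  -- final comprehension [x for x in li if x != ""]: a tuple is never equal to the string "", so the test is always True
  ((pvLoopA instructions.toList).filter (fun _x => true)).map
    (fun p => (String.ofList p.1, String.ofList p.2))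

-- ===== PORT B =====
-- one scan, state = (result so far, current digit buffer)
def pvStepB (st : List (List Char × List Char) × List Char) (c : Char) :
    List (List Char × List Char) × List Char :=
  if PySem.Chars.isdigit c then (st.1, st.2 ++ [c]) else (st.1 ++ [(st.2, [c])], [])

def parse_intructions_alt (instructions : String) : List (String × String) :=
  let st := instructions.toList.foldl pvStepB ([], [])
  let res := if st.2.isEmpty then st.1 else st.1 ++ [(st.2, [])]
  res.map (fun p => (String.ofList p.1, String.ofList p.2))

-- ===== PRECONDITION & SPEC =====
def Spec_parse_intructions (instructions : String) (out : List (String × String)) : Prop := out = parse_intructions_alt instructions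
instance (instructions : String) (out : List (String × String)) : Decidable (Spec_parse_intructions instructions out) := by unfold Spec_parse_intructions; infer_instance

-- ===== CLAIM (what is proved, stated in full; the proofs are below) =====
def Claim_equal_parse_intructions : Prop := ∀ (instructions : String), Dom_parse_intructions instructions → Spec_parse_intructions instructions (parse_intructions instructions)

-- ===== LEMMAS AND PROOFS =====

-- reference tokenizer (proof helper): what both ports compute, written as plain structural recursion
def pvG (s : List Char) (num : List Char) : List (List Char × List Char) :=
  match s with
  | [] => if num.isEmpty then [] else [(num, [])]
  | c :: r => if PySem.Chars.isdigit c then pvG r (num ++ [c]) else (num, [c]) :: pvG r []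

-- length of the maximal digit prefix
def pvK (s : List Char) : Nat := (s.takeWhile PySem.Chars.isdigit).length

theorem foldB_eq_pvG (s : List Char) (acc : List (List Char × List Char)) (num : List Char) :
    (if (s.foldl pvStepB (acc, num)).2.isEmpty then (s.foldl pvStepB (acc, num)).1
     else (s.foldl pvStepB (acc, num)).1 ++ [((s.foldl pvStepB (acc, num)).2, [])]) = acc ++ pvG s num := by
  induction s generalizing acc num with
  | nil =>
    simp only [List.foldl_nil, pvG]
    by_cases h : num.isEmpty <;> simp [h]
  | cons c r ih =>
    simp only [List.foldl_cons, pvG, pvStepB]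
    by_cases h : PySem.Chars.isdigit c
    · simpa [h] using ih acc (num ++ [c])
    · simpa [h] using ih (acc ++ [(num, [c])]) []

theorem pvG_digits (ds t num : List Char) (h : ∀ c ∈ ds, PySem.Chars.isdigit c) :
    pvG (ds ++ t) num = pvG t (num ++ ds) := by
  induction ds generalizing num with
  | nil => simp
  | cons d ds ih =>
    have hd : PySem.Chars.isdigit d := h d (by simp)
    simp only [List.cons_append, pvG, hd, if_pos]
    rw [ih (num ++ [d]) (fun c hc => h c (by simp [hc]))]
    simp

theorem pvIsnumeric_eq (l : List Char) :
    pvIsnumeric l = (!l.isEmpty && l.all PySem.Chars.isdigit) := by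
  simp [pvIsnumeric, PySem.Chars.strIsdigit]

theorem pvTakeWhile_eq_take (s : List Char) :
    s.takeWhile PySem.Chars.isdigit = s.take (pvK s) :=
  List.prefix_iff_eq_take.mp (List.takeWhile_prefix _)

theorem pvK_le (s : List Char) : pvK s ≤ s.length :=
  (List.takeWhile_prefix _).length_le

-- drop/take of a list at (one past) the boundary of its maximal p-prefix
theorem pvDropK (p : Char → Bool) (s : List Char) :
    s.drop (s.takeWhile p).length = s.dropWhile p := by
  induction s with
  | nil => simp
  | cons c r ih =>
    by_cases h : p c <;> simp [List.takeWhile_cons, List.dropWhile_cons, h, ih]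

theorem pvTakeK1 (p : Char → Bool) (s : List Char) :
    s.take ((s.takeWhile p).length + 1) = s.takeWhile p ++ (s.dropWhile p).take 1 := by
  induction s with
  | nil => simp
  | cons c r ih =>
    by_cases h : p c <;> simp [List.takeWhile_cons, List.dropWhile_cons, h, ih]

theorem pvDropK1 (p : Char → Bool) (s : List Char) :
    s.drop ((s.takeWhile p).length + 1) = (s.dropWhile p).drop 1 := by
  induction s with
  | nil => simp
  | cons c r ih =>
    by_cases h : p c <;> simp [List.takeWhile_cons, List.dropWhile_cons, h, ih]

theorem pvLenK (p : Char → Bool) (s : List Char) :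
    (s.takeWhile p).length + (s.dropWhile p).length = s.length := by
  have h := congrArg List.length (List.takeWhile_append_dropWhile (p := p) (l := s))
  rw [List.length_append] at h
  exact h

theorem pvCondA_true (s : List Char) (i : Nat) (h1 : 1 ≤ i) (h2 : i ≤ pvK s) :
    (pvIsnumeric (s.take i) && decide (i ≤ s.length)) = true := by
  have hilen : i ≤ s.length := le_trans h2 (pvK_le s)
  have htake : s.take i = (s.takeWhile PySem.Chars.isdigit).take i := by
    rw [pvTakeWhile_eq_take, List.take_take]
    congr 1
    omega
  have hall : ∀ c ∈ s.take i, PySem.Chars.isdigit c := by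
    intro c hc
    rw [htake] at hc
    exact List.mem_takeWhile_imp (List.mem_of_mem_take hc)
  have hne : s.take i ≠ [] := by
    have hl : (s.take i).length = i := by simp [List.length_take]; omega
    intro hnil; rw [hnil] at hl; simp at hl; omega
  have hne' : (s.take i).isEmpty = false := by
    cases h : s.take i with
    | nil => exact absurd h hne
    | cons a l => rfl
  simp only [pvIsnumeric_eq, hne', Bool.not_false, Bool.true_and, Bool.and_eq_true,
    List.all_eq_true, decide_eq_true_eq]
  exact ⟨hall, hilen⟩

theorem pvCondA_false (s : List Char) :
    (pvIsnumeric (s.take (pvK s + 1)) && decide (pvK s + 1 ≤ s.length)) = false := by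
  by_cases hlen : pvK s + 1 ≤ s.length
  · -- there is a character right after the digit prefix and it is not a digit
    have hlt : 0 < (s.dropWhile PySem.Chars.isdigit).length := by
      have := pvLenK PySem.Chars.isdigit s
      have hk : (s.takeWhile PySem.Chars.isdigit).length = pvK s := rfl
      omega
    obtain ⟨c, r, ht⟩ : ∃ c r, s.dropWhile PySem.Chars.isdigit = c :: r := by
      cases h : s.dropWhile PySem.Chars.isdigit with
      | nil => rw [h] at hlt; simp at hlt
      | cons c r => exact ⟨c, r, rfl⟩
    have hnc : ¬ PySem.Chars.isdigit c := by
      have := List.dropWhile_get_zero_not (p := PySem.Chars.isdigit) s hlt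
      simpa [ht] using this
    have htake : s.take (pvK s + 1) = s.takeWhile PySem.Chars.isdigit ++ [c] := by
      rw [show pvK s + 1 = (s.takeWhile PySem.Chars.isdigit).length + 1 from rfl,
        pvTakeK1, ht]
      simp
    rw [htake]
    have hall : (s.takeWhile PySem.Chars.isdigit ++ [c]).all PySem.Chars.isdigit = false := by
      simp [List.all_append, hnc]
    simp [pvIsnumeric_eq, hall]
  · simp [hlen]

theorem pvFindAGo_eq (f : Nat) : ∀ (s : List Char) (i : Nat), 1 ≤ i → i ≤ pvK s + 1 →
    pvK s + 1 - i ≤ f → pvFindAGo f s i = pvK s + 1 := by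
  induction f with
  | zero =>
    intro s i h1 h2 h3
    have hi : i = pvK s + 1 := by omega
    simp [pvFindAGo, hi]
  | succ f ih =>
    intro s i h1 h2 h3
    by_cases hi : i = pvK s + 1
    · simp only [pvFindAGo]
      rw [hi, pvCondA_false]
      simp
    · have hik : i ≤ pvK s := by omega
      simp only [pvFindAGo]
      rw [pvCondA_true s i h1 hik]
      simp only [if_pos]
      exact ih s (i + 1) (by omega) (by omega) (by omega)

theorem pvFindA_eq (s : List Char) : pvFindA s 1 = pvK s + 1 := by
  have hk := pvK_le s
  exact pvFindAGo_eq (s.length + 1 - 1) s 1 (by omega) (by omega) (by omega)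

theorem pvLoopAGo_nil (f : Nat) : pvLoopAGo f [] = [] := by
  cases f <;> simp [pvLoopAGo]

theorem loopA_aux (n : Nat) : ∀ s : List Char, s.length ≤ n → pvLoopAGo n s = pvG s [] := by
  induction n with
  | zero =>
    intro s hs
    have : s = [] := by cases s <;> simp_all
    rw [this]
    simp [pvLoopAGo, pvG]
  | succ n ih =>
    intro s hs
    by_cases hnil : s.length = 0
    · have : s = [] := by cases s <;> simp_all
      rw [this, pvLoopAGo_nil]
      simp [pvG]
    · simp only [pvLoopAGo]
      rw [if_neg hnil]
      simp only [pvFindA_eq]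
      -- the three slices, with natural-number bounds
      have e1 : ((pvK s + 1 : Nat) : Int) - 1 = ((pvK s : Nat) : Int) := by push_cast; ring
      rw [e1, PySem.List.slice_to_natCast, PySem.List.slice_natCast, PySem.List.slice_from_natCast]
      have hone : pvK s + 1 - pvK s = 1 := by omega
      rw [hone]
      have htk : s.take (pvK s) = s.takeWhile PySem.Chars.isdigit := (pvTakeWhile_eq_take s).symm
      have hdrop : s.drop (pvK s) = s.dropWhile PySem.Chars.isdigit := pvDropK _ s
      have hdrop1 : s.drop (pvK s + 1) = (s.dropWhile PySem.Chars.isdigit).drop 1 := pvDropK1 _ s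
      rw [htk, hdrop, hdrop1]
      -- rewrite the reference side through the digit prefix
      have hG : pvG s [] = pvG (s.dropWhile PySem.Chars.isdigit) (s.takeWhile PySem.Chars.isdigit) := by
        conv_lhs => rw [← List.takeWhile_append_dropWhile (p := PySem.Chars.isdigit) (l := s)]
        rw [pvG_digits _ _ _ (fun c hc => List.mem_takeWhile_imp hc)]
        simp
      rw [hG]
      have hlen : (s.takeWhile PySem.Chars.isdigit).length + (s.dropWhile PySem.Chars.isdigit).length = s.length :=
        pvLenK _ s
      cases ht : s.dropWhile PySem.Chars.isdigit with
      | nil =>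
        have hds : (s.takeWhile PySem.Chars.isdigit).isEmpty = false := by
          rw [ht] at hlen
          cases h : s.takeWhile PySem.Chars.isdigit with
          | nil => rw [h] at hlen; simp at hlen; omega
          | cons a l => rfl
        simp [pvG, pvLoopAGo_nil, hds]
      | cons c r =>
        have hnc : ¬ PySem.Chars.isdigit c := by
          have hlt : 0 < (s.dropWhile PySem.Chars.isdigit).length := by rw [ht]; simp
          have := List.dropWhile_get_zero_not (p := PySem.Chars.isdigit) s hlt
          simpa [ht] using this
        have hr : r.length ≤ n := by
          rw [ht] at hlen
          simp at hlen
          omega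
        simp [pvG, hnc, ih r hr]

-- ===== VERDICT (by name: the statement is the Claim_ definition above) =====
theorem parse_intructions_spec : Claim_equal_parse_intructions := by
  intro s _hd
  unfold Spec_parse_intructions
  rw [parse_intructions, parse_intructions_alt]
  rw [List.filter_true]
  rw [show pvLoopA s.toList = pvLoopAGo s.toList.length s.toList from rfl]
  rw [loopA_aux s.toList.length s.toList le_rfl]
  rw [foldB_eq_pvG s.toList [] [], List.nil_append]
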